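-- pv_equiv track=rewrite | github.com/Geunbaek/algorithm | programmers/크레인 인형뽑기 게임.py | solution
-- ===== SOURCE A (Python) =====
-- def solution(board, moves):
--     answer = 0
--     r, c = len(board), len(board[0])
--     newBoard = []
--     for x in range(c):
--         newBoard.append([])
--         for y in range(r - 1, -1, -1):
--             if board[y][x] != 0:
--                 newBoard[-1].append(board[y][x])
--
--     basket = []
--
--     for move in moves:
--         if newBoard[move - 1]:
--             doll = newBoard[move - 1].pop()
--             if basket and basket[-1] == doll:
--                 basket.pop()
--                 answer += 2
--             else:
--                 basket.append(doll)
--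
--     return answer
-- ===== SOURCE B (Python) =====
-- def solution(board, moves):
--     answer = 0
--     r, c = len(board), len(board[0])
--     top = [0] * c  # per-column pointer to the highest not-yet-taken row
--     basket = []
--     for move in moves:
--         j = move - 1
--         t = top[j]
--         while t < r and board[t][j] == 0:
--             t += 1
--         if t < r:
--             doll = board[t][j]
--             top[j] = t + 1
--             if basket and basket[-1] == doll:
--                 basket.pop()
--                 answer += 2
--             else:
--                 basket.append(doll)
--     return answer
-- ===== Notes on version B (the rewrite author's own statement) =====
-- stated objective: alternative
-- what changed: B never builds the per-column popped stacks (newBoard): it keeps a per-column row pointer into the untouched board and, on each move, advances it past zeros to read the next doll directly.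
-- outside the precondition, e.g. on solution([[1], [2, 1], [0, 1, 0]], [1, 0, 1, 1]): A returns 0, B returns 2
import Mathlib
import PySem

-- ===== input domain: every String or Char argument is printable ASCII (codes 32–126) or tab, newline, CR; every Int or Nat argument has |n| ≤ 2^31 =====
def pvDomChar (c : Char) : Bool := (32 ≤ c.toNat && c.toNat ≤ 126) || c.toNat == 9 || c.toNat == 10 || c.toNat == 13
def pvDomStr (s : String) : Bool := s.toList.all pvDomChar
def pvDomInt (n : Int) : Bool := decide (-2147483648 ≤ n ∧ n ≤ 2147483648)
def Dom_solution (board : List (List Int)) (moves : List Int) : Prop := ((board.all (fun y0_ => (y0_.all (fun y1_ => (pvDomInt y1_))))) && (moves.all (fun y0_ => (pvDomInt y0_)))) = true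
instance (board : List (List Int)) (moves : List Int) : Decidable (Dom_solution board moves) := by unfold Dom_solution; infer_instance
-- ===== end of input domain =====

-- B replaces A's precomputed per-column stacks (newBoard) by per-column row pointers into the
-- original board, advanced past zeros on demand; return values only, neither mutates its input.

-- ===== PORT A =====
-- board[y][x] (in range under Pre_)
def pvCell (board : List (List Int)) (y x : Nat) : Int := (board.getD y []).getD x 0

-- Python's negative-index wraparound for a list of length `len` (index in range under Pre_)
def pvIdx (len i : Int) : Nat := (if i < 0 then i + len else i).toNat

-- one iteration of A's `for move in moves` loop; state = (newBoard, basket, answer)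
def pvStepA (st : List (List Int) × List Int × Int) (move : Int) : List (List Int) × List Int × Int :=
  let nb := st.1
  let basket := st.2.1
  let ans := st.2.2
  let j := pvIdx (nb.length : Int) (move - 1)
  let col := nb.getD j []
  match col.getLast? with           -- `if newBoard[move-1]: doll = newBoard[move-1].pop()`
  | none => st
  | some doll =>
    let nb' := nb.set j col.dropLast
    match basket with
    | b :: rest => if b = doll then (nb', rest, ans + 2) else (nb', doll :: b :: rest, ans)
    | [] => (nb', [doll], ans)

def solution (board : List (List Int)) (moves : List Int) : Int :=
  let r := board.length
  let c := (board.headD []).length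
  -- for x in range(c): newBoard.append([]); for y in range(r-1,-1,-1): if board[y][x] != 0: append
  let newBoard := (List.range c).map (fun x =>
    ((List.range r).reverse).foldl
      (fun col y => if pvCell board y x ≠ 0 then col ++ [pvCell board y x] else col) [])
  (moves.foldl pvStepA (newBoard, [], 0)).2.2

-- ===== PORT B =====
-- the `while t < r and board[t][j] == 0: t += 1` loop
def pvAdvance (board : List (List Int)) (r j t : Nat) : Nat :=
  if t < r then (if pvCell board t j = 0 then pvAdvance board r j (t + 1) else t) else t
termination_by r - t

-- one iteration of B's loop; state = (top, basket, answer)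
def pvStepB (board : List (List Int)) (r : Nat) (st : List Nat × List Int × Int) (move : Int) :
    List Nat × List Int × Int :=
  let top := st.1
  let basket := st.2.1
  let ans := st.2.2
  let j := pvIdx (top.length : Int) (move - 1)
  let t := pvAdvance board r j (top.getD j 0)
  if t < r then
    let doll := pvCell board t j
    let top' := top.set j (t + 1)
    match basket with
    | b :: rest => if b = doll then (top', rest, ans + 2) else (top', doll :: b :: rest, ans)
    | [] => (top', [doll], ans)
  else st

def solution_alt (board : List (List Int)) (moves : List Int) : Int :=
  let r := board.length
  let c := (board.headD []).length
  (moves.foldl (pvStepB board r) (List.replicate c 0, [], 0)).2.2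

-- ===== PRECONDITION & SPEC =====
-- Pre_ excludes: empty boards, rows shorter than row 0, and moves outside [1-c, c] (A raises
-- IndexError on all of these), plus the corner of a ragged board (some row longer than row 0)
-- combined with a nonpositive move, where A's and B's negative-index wraparounds accidentally
-- alias different cells (A the column c-1 it precomputed, B the last cell of the touched row).
def Pre_solution (board : List (List Int)) (moves : List Int) : Prop :=
  board ≠ [] ∧
  (∀ row ∈ board, (board.headD []).length ≤ row.length) ∧
  (∀ m ∈ moves, 1 - ((board.headD []).length : Int) ≤ m ∧ m ≤ ((board.headD []).length : Int)) ∧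
  ((∃ m ∈ moves, m ≤ 0) → ∀ row ∈ board, row.length = (board.headD []).length)
instance (board : List (List Int)) (moves : List Int) : Decidable (Pre_solution board moves) := by
  unfold Pre_solution; infer_instance

def pvWitness_solution : List (List Int) × List Int := ([[0, 0], [1, 2], [2, 1]], [1, 2, 2, 1])

def Spec_solution (board : List (List Int)) (moves : List Int) (out : Int) : Prop :=
  out = solution_alt board moves
instance (board : List (List Int)) (moves : List Int) (out : Int) :
    Decidable (Spec_solution board moves out) := by unfold Spec_solution; infer_instance

-- ===== CLAIM (what is proved, stated in full; the proofs are below) =====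
def Claim_equal_solution : Prop := ∀ (board : List (List Int)) (moves : List Int),
  Dom_solution board moves → Pre_solution board moves →
  Spec_solution board moves (solution board moves)

-- ===== LEMMAS AND PROOFS =====

-- the still-to-be-taken dolls of column j, top row first, starting at row t
def pvColL (board : List (List Int)) (j t : Nat) : List Int :=
  ((board.drop t).map (fun row => row.getD j 0)).filter (· ≠ 0)

lemma pvColL_ge (board : List (List Int)) (j t : Nat) (h : board.length ≤ t) :
    pvColL board j t = [] := by
  simp [pvColL, List.drop_eq_nil_of_le h]

lemma pvColL_cons (board : List (List Int)) (j t : Nat) (h : t < board.length) :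
    pvColL board j t =
      (if pvCell board t j ≠ 0 then [pvCell board t j] else []) ++ pvColL board j (t + 1) := by
  have : board.drop t = board[t] :: board.drop (t + 1) := List.drop_eq_getElem_cons h
  simp only [pvColL, this, List.map_cons, List.filter_cons, pvCell, List.getD_eq_getElem?_getD,
    List.getElem?_eq_getElem h]
  split <;> simp_all

lemma pvAdvance_spec (board : List (List Int)) (j : Nat) :
    ∀ t, pvColL board j (pvAdvance board (board.length) j t) = pvColL board j t ∧
      (pvAdvance board (board.length) j t < board.length →
        pvCell board (pvAdvance board (board.length) j t) j ≠ 0) ∧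
      (¬ pvAdvance board (board.length) j t < board.length → pvColL board j t = []) := by
  intro t
  induction' hi : board.length - t with k ih generalizing t
  · have h : ¬ t < board.length := by omega
    rw [pvAdvance, if_neg h]
    exact ⟨rfl, fun hc => absurd hc h, fun _ => pvColL_ge _ _ _ (by omega)⟩
  · by_cases h : t < board.length
    · rw [pvAdvance, if_pos h]
      by_cases hv : pvCell board t j = 0
      · rw [if_pos hv]
        obtain ⟨h1, h2, h3⟩ := ih (t + 1) (by omega)
        have he : pvColL board j t = pvColL board j (t + 1) := by
          rw [pvColL_cons board j t h]; simp [hv]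
        exact ⟨by rw [h1, he], h2, fun hn => by rw [he]; exact h3 hn⟩
      · rw [if_neg hv]
        exact ⟨rfl, fun _ => hv, fun hc => absurd h hc⟩
    · rw [pvAdvance, if_neg h]
      exact ⟨rfl, fun hc => absurd hc h, fun _ => pvColL_ge _ _ _ (by omega)⟩

-- popping from the back of l, seen through l.reverse
lemma pop_back {l tl : List Int} {v : Int} (h : l.reverse = v :: tl) :
    l.getLast? = some v ∧ l.dropLast.reverse = tl := by
  have hl : l = tl.reverse ++ [v] := by
    have := congrArg List.reverse h
    simpa using this
  subst hl
  constructor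
  · simp
  · simp

-- the common basket/answer update of both step functions, factored for the proof
def pvBask (basket : List Int) (doll : Int) : List Int :=
  match basket with
  | b :: rest => if b = doll then rest else doll :: b :: rest
  | [] => [doll]

def pvAns (basket : List Int) (doll : Int) (ans : Int) : Int :=
  match basket with
  | b :: _ => if b = doll then ans + 2 else ans
  | [] => ans

-- the main loop invariant: answers agree when reverse of each remaining A-column is the
-- pending top-down doll list of B's pointer
lemma fold_eq (board : List (List Int)) (c : Nat) :
    ∀ (moves : List Int) (nb : List (List Int)) (top : List Nat) (basket : List Int) (ans : Int),
      (∀ m ∈ moves, 1 - (c : Int) ≤ m ∧ m ≤ (c : Int)) →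
      nb.length = c → top.length = c →
      (∀ j, j < c → (nb.getD j []).reverse = pvColL board j (top.getD j 0)) →
      (moves.foldl pvStepA (nb, basket, ans)).2.2 =
        (moves.foldl (pvStepB board board.length) (top, basket, ans)).2.2 := by
  intro moves
  induction moves with
  | nil => intro nb top basket ans _ _ _ _; rfl
  | cons m ms ih =>
    intro nb top basket ans hm hnb htop hinv
    have hm1 := hm m (by simp)
    set j := pvIdx (c : Int) (m - 1) with hjdef
    have hj : j < c := by rw [hjdef]; unfold pvIdx; split <;> omega
    set t := top.getD j 0 with htdef
    set t' := pvAdvance board board.length j t with ht'def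
    obtain ⟨hA1, hA2, hA3⟩ := pvAdvance_spec board j t
    rw [← ht'def] at hA1 hA2 hA3
    have hcol : (nb.getD j []).reverse = pvColL board j t := hinv j hj
    by_cases hlt : t' < board.length
    · -- a doll is taken in both versions
      have hnz := hA2 hlt
      have hcolcons : pvColL board j t = pvCell board t' j :: pvColL board j (t' + 1) := by
        rw [← hA1, pvColL_cons board j t' hlt, if_pos hnz]; rfl
      set doll := pvCell board t' j with hdoll
      have hrev : (nb.getD j []).reverse = doll :: pvColL board j (t' + 1) := by
        rw [hcol, hcolcons]
      obtain ⟨hlast, hdrop⟩ := pop_back hrev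
      -- both steps produce the same basket and answer
      have hinv' : ∀ j', j' < c →
          (((nb.set j (nb.getD j []).dropLast).getD j' []).reverse) =
            pvColL board j' ((top.set j (t' + 1)).getD j' 0) := by
        intro j' hj'
        by_cases he : j' = j
        · subst he
          have h1 : (nb.set j (nb.getD j []).dropLast).getD j [] = (nb.getD j []).dropLast := by
            rw [List.getD_eq_getElem?_getD, List.getElem?_set_self (by omega)]; rfl
          have h2 : (top.set j (t' + 1)).getD j 0 = t' + 1 := by
            rw [List.getD_eq_getElem?_getD, List.getElem?_set_self (by omega)]; rfl
          rw [h1, h2, hdrop]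
        · have h1 : (nb.set j (nb.getD j []).dropLast).getD j' [] = nb.getD j' [] := by
            rw [List.getD_eq_getElem?_getD, List.getElem?_set_ne (by omega),
              ← List.getD_eq_getElem?_getD]
          have h2 : (top.set j (t' + 1)).getD j' 0 = top.getD j' 0 := by
            rw [List.getD_eq_getElem?_getD, List.getElem?_set_ne (by omega),
              ← List.getD_eq_getElem?_getD]
          rw [h1, h2]
          exact hinv j' hj'
      have hA : pvStepA (nb, basket, ans) m =
          (nb.set j (nb.getD j []).dropLast, pvBask basket doll, pvAns basket doll ans) := by
        simp only [pvStepA, hnb, ← hjdef, hlast, pvBask, pvAns]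
        cases basket with
        | nil => rfl
        | cons b rest => by_cases hb : b = doll <;> simp [hb]
      have hB : pvStepB board board.length (top, basket, ans) m =
          (top.set j (t' + 1), pvBask basket doll, pvAns basket doll ans) := by
        simp only [pvStepB, htop, ← hjdef, ← htdef, ← ht'def, if_pos hlt, ← hdoll, pvBask, pvAns]
        cases basket with
        | nil => rfl
        | cons b rest => by_cases hb : b = doll <;> simp [hb]
      rw [List.foldl_cons, List.foldl_cons, hA, hB]
      exact ih _ _ _ _ (fun x hx => hm x (by simp [hx]))
        (by simp [hnb]) (by simp [htop]) hinv'
    · -- the column is exhausted: both steps leave the state unchanged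
      have hempty : nb.getD j [] = [] := by
        have h0 : (nb.getD j []).reverse = [] := by rw [hcol, hA3 hlt]
        simpa using h0
      have hA : pvStepA (nb, basket, ans) m = (nb, basket, ans) := by
        simp only [pvStepA, hnb, ← hjdef, hempty, List.getLast?_nil]
      have hB : pvStepB board board.length (top, basket, ans) m = (top, basket, ans) := by
        simp only [pvStepB, htop, ← hjdef, ← htdef, ← ht'def, if_neg hlt]
      rw [List.foldl_cons, List.foldl_cons, hA, hB]
      exact ih _ _ _ _ (fun x hx => hm x (by simp [hx])) hnb htop hinv

-- foldl-append accumulation of A's inner loop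
lemma foldl_append_filterMap (f : Nat → Int) :
    ∀ (ys : List Nat) (acc : List Int),
      ys.foldl (fun col y => if f y ≠ 0 then col ++ [f y] else col) acc =
        acc ++ (ys.filter (fun y => f y ≠ 0)).map f := by
  intro ys
  induction ys with
  | nil => simp
  | cons y ys ih =>
    intro acc
    rw [List.foldl_cons]
    by_cases h : f y = 0
    · rw [if_neg (show ¬ f y ≠ 0 by simp [h]), ih, List.filter_cons]
      simp [h]
    · rw [if_pos h, ih, List.filter_cons]
      simp [h, List.append_assoc]

-- A's initial column x equals B's pending list for pointer 0, reversed
lemma init_col (board : List (List Int)) (x : Nat) :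
    (((List.range board.length).reverse).foldl
        (fun col y => if pvCell board y x ≠ 0 then col ++ [pvCell board y x] else col) []).reverse
      = pvColL board x 0 := by
  rw [foldl_append_filterMap (fun y => pvCell board y x)]
  have hmap : board.map (fun row => row.getD x 0) =
      (List.range board.length).map (fun y => pvCell board y x) := by
    apply List.ext_getElem
    · simp
    · intro i h1 h2
      simp only [List.getElem_map, List.getElem_range]
      simp [pvCell, List.getD_eq_getElem?_getD, List.getElem?_eq_getElem (by simpa using h1)]
  simp only [pvColL, List.drop_zero, hmap, List.filter_map, List.nil_append,
    ← List.map_reverse, ← List.filter_reverse, List.reverse_reverse]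
  rfl

-- ===== VERDICT (by name: the statement is the Claim_ definition above) =====
theorem solution_spec : Claim_equal_solution := by
  intro board moves _ hpre
  obtain ⟨hne, hrows, hmoves, hrect⟩ := hpre
  unfold Spec_solution solution solution_alt
  apply fold_eq board ((board.headD []).length) moves
  · exact hmoves
  · simp
  · simp
  · intro j hj
    rw [List.getD_eq_getElem?_getD, List.getElem?_map, List.getElem?_range (by simpa using hj)]
    rw [List.getD_eq_getElem?_getD, List.getElem?_replicate_of_lt (by simpa using hj)]
    simpa using init_col board j
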